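-- pv_equiv track=rewrite | github.com/charlesreid1/rejoyce | solutions/week18_penelope.py | prepare_for_texttiling
-- ===== SOURCE A (Python) =====
-- def prepare_for_texttiling(text):
--     """Prepare Penelope's unpunctuated text for TextTiling.
--
--     TextTiling expects paragraph-structured text. Since Penelope has
--     minimal structure, we create artificial paragraph breaks every ~200 words.
--     """
--     tokens = text.split()
--     paragraphs = []
--     chunk_size = 200
--
--     for i in range(0, len(tokens), chunk_size):
--         chunk = ' '.join(tokens[i:i+chunk_size])
--         paragraphs.append(chunk)
--
--     return '\n\n'.join(paragraphs)
-- ===== SOURCE B (Python) =====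
-- def prepare_for_texttiling(text):
--     """Prepare Penelope's unpunctuated text for TextTiling.
--
--     Single pass: walk the tokens once, inserting '\n\n' before every
--     200th token and ' ' before every other token, then join the pieces.
--     """
--     tokens = text.split()
--     pieces = []
--     for i, tok in enumerate(tokens):
--         if i > 0:
--             pieces.append('\n\n' if i % 200 == 0 else ' ')
--         pieces.append(tok)
--     return ''.join(pieces)
-- ===== Notes on version B (the rewrite author's own statement) =====
-- stated objective: alternative
-- what changed: Replaces chunk-slicing over range(0,len,200) with nested ' '-joins and an outer '\n\n'-join by a single flat pass over enumerate(tokens) that emits the right separator ('\n\n' at multiples of 200, ' ' otherwise) before each token and does one final ''.join.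
import Mathlib
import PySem

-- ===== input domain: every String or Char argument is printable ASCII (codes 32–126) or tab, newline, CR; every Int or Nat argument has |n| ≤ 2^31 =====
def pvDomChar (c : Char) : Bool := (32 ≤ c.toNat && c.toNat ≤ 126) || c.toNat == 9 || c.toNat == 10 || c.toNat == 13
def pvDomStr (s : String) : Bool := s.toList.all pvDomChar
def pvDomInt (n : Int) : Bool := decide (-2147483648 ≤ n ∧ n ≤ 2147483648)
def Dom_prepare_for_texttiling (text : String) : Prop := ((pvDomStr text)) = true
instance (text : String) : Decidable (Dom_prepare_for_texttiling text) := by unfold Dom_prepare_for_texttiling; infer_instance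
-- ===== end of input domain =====

-- B replaces A's chunk slicing (range(0,len,200) with a ' '-join per chunk and a '\n\n'-join of chunks)
-- by one flat pass over enumerate(tokens) that emits the separator before each token (alternative decomposition).


-- ===== PORT A =====
def prepare_for_texttiling (text : String) : String :=
  let tokens := PySem.Str.split₀ text
  let chunk_size : Int := 200
  let paragraphs : List String :=
    (PySem.List.pyRange 0 (tokens.length : Int) chunk_size).foldl
      (fun acc i =>
        let chunk := PySem.Str.join " " (PySem.List.slice tokens (some i) (some (i + chunk_size)))
        acc ++ [chunk]) []
  PySem.Str.join "\n\n" paragraphs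

-- ===== PORT B =====
def prepare_for_texttiling_alt (text : String) : String :=
  let tokens := PySem.Str.split₀ text
  let pieces : List String :=
    (PySem.List.enumerate tokens 0).foldl
      (fun acc p =>
        let acc := if 0 < p.1 then
            acc ++ [if PySem.Int.mod p.1 200 = 0 then "\n\n" else " "]
          else acc
        acc ++ [p.2]) []
  PySem.Str.join "" pieces


-- ===== PRECONDITION & SPEC =====
def Spec_prepare_for_texttiling (text : String) (out : String) : Prop := out = prepare_for_texttiling_alt text
instance (text : String) (out : String) : Decidable (Spec_prepare_for_texttiling text out) := by unfold Spec_prepare_for_texttiling; infer_instance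

-- ===== CLAIM (what is proved, stated in full; the proofs are below) =====
def Claim_equal_prepare_for_texttiling : Prop := ∀ (text : String), Dom_prepare_for_texttiling text → Spec_prepare_for_texttiling text (prepare_for_texttiling text)

-- ===== LEMMAS AND PROOFS =====

lemma pv_join_cons (sep : List Char) : ∀ (xs : List (List Char)) (x : List Char),
    PySem.Chars.join sep (x :: xs) = x ++ xs.flatMap (fun y => sep ++ y) := by
  intro xs
  induction xs with
  | nil => intro x; simp [PySem.Chars.join_singleton]
  | cons y ys ih =>
      intro x
      rw [PySem.Chars.join_cons_cons, ih y]
      simp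

lemma pv_join_empty_sep : ∀ (parts : List (List Char)),
    PySem.Chars.join [] parts = parts.flatten := by
  intro parts
  cases parts with
  | nil => simp [PySem.Chars.join_nil]
  | cons x xs => rw [pv_join_cons]; simp

lemma pv_flatMap_ne_nil (sep : List Char) (xs : List (List Char)) (h : xs ≠ []) :
    xs.flatMap (fun y => sep ++ y) = sep ++ PySem.Chars.join sep xs := by
  cases xs with
  | nil => exact absurd rfl h
  | cons y ys => rw [pv_join_cons]; simp
def pvNN : List Char := "\n\n".toList
def pvSP : List Char := " ".toList
def pvHfn (p : Int × String) : List Char :=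
  (if 0 < p.1 then (if PySem.Int.mod p.1 200 = 0 then pvNN else pvSP) else []) ++ p.2.toList

lemma pv_small : ∀ (toks : List String) (n : Int), 0 < n → n + toks.length ≤ 200 →
    (PySem.List.enumerate toks n).flatMap pvHfn
      = toks.flatMap (fun t => pvSP ++ t.toList) := by
  intro toks
  induction toks with
  | nil => intro n _ _; simp [PySem.List.enumerate_nil]
  | cons t ts ih =>
      intro n hn hle
      rw [PySem.List.enumerate_cons]
      simp only [List.flatMap_cons]
      have hmod : PySem.Int.mod n 200 = n := by
        rw [PySem.Int.mod_eq_emod_of_pos (by norm_num)]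
        exact Int.emod_eq_of_lt (le_of_lt hn) (by simp at hle; omega)
      rw [ih (n + 1) (by omega) (by simp at hle ⊢; omega)]
      have hnd : ¬ ((200:Int) ∣ n) := by simp at hle; omega
      simp [pvHfn, hn, hnd]

lemma pv_small0 (toks : List String) (h : toks ≠ []) (hl : toks.length ≤ 200) :
    (PySem.List.enumerate toks 0).flatMap pvHfn
      = PySem.Chars.join pvSP (toks.map String.toList) := by
  cases toks with
  | nil => exact absurd rfl h
  | cons t ts =>
      rw [PySem.List.enumerate_cons]
      simp only [List.flatMap_cons, zero_add]
      rw [pv_small ts 1 (by norm_num) (by simp at hl ⊢; omega)]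
      rw [List.map_cons, pv_join_cons]
      simp [pvHfn, List.flatMap_map]

lemma pv_shift : ∀ (toks : List String) (n : Int), 0 < n →
    (PySem.List.enumerate toks (n + 200)).flatMap pvHfn
      = (PySem.List.enumerate toks n).flatMap pvHfn := by
  intro toks
  induction toks with
  | nil => intro n _; simp [PySem.List.enumerate_nil]
  | cons t ts ih =>
      intro n hn
      rw [PySem.List.enumerate_cons, PySem.List.enumerate_cons]
      simp only [List.flatMap_cons]
      have hmod : PySem.Int.mod (n + 200) 200 = PySem.Int.mod n 200 := by
        rw [PySem.Int.mod_eq_emod_of_pos (by norm_num), PySem.Int.mod_eq_emod_of_pos (by norm_num)]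
        omega
      have : n + 200 + 1 = (n + 1) + 200 := by ring
      rw [this, ih (n + 1) (by omega)]
      simp [pvHfn, hn, (by omega : (0:Int) < n + 200)]

lemma pv_range200 (L : Nat) :
    PySem.List.pyRange 0 (L : Int) 200
      = (List.range (((L : Int) + 199) / 200).toNat).map (fun k : Nat => 200 * (k : Int)) := by
  rw [PySem.List.pyRange_of_pos _ _ (by norm_num)]
  rcases Nat.eq_zero_or_pos L with h | h
  · subst h; norm_num
  · rw [if_pos (by exact_mod_cast h)]
    rw [show ((L:Int) - 0 + 200 - 1) = (L:Int) + 199 from by ring]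
    simp only [zero_add]
def pvChunkRow (toks : List String) : List (List Char) :=
  (List.range ((((toks.length : Int)) + 199) / 200).toNat).map
    (fun k => PySem.Chars.join pvSP ((((toks.drop (200 * k)).take 200)).map String.toList))

lemma pv_main : ∀ (L : Nat) (toks : List String), toks.length ≤ L →
    PySem.Chars.join pvNN (pvChunkRow toks)
      = (PySem.List.enumerate toks 0).flatMap pvHfn := by
  intro L
  induction L with
  | zero =>
      intro toks hlen
      have : toks = [] := List.eq_nil_of_length_eq_zero (by omega)
      subst this
      simp [pvChunkRow, PySem.Chars.join_nil, PySem.List.enumerate_nil]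
  | succ M ih =>
      intro toks hlen
      rcases toks.eq_nil_or_concat' with hnil | hne
      · subst hnil
        simp [pvChunkRow, PySem.Chars.join_nil, PySem.List.enumerate_nil]
      · have hne : toks ≠ [] := by rcases hne with ⟨_, _, h⟩; subst h; simp
        by_cases h200 : toks.length ≤ 200
        · have hcnt : ((((toks.length : Int)) + 199) / 200).toNat = 1 := by
            have : 0 < toks.length := List.length_pos_iff.mpr hne
            omega
          have hcr : pvChunkRow toks = [PySem.Chars.join pvSP (toks.map String.toList)] := by
            unfold pvChunkRow
            rw [hcnt]
            simp only [List.range_one, List.map_cons, List.map_nil, Nat.mul_zero, List.drop_zero]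
            rw [List.map_take, List.take_of_length_le (by simpa using h200)]
          rw [hcr, PySem.Chars.join_singleton, ← pv_small0 toks hne h200]
        · rw [not_le] at h200
          have hBlen : (toks.drop 200).length = toks.length - 200 := by simp
          have hcnt : ((((toks.length : Int)) + 199) / 200).toNat
              = (((((toks.drop 200).length : Int)) + 199) / 200).toNat + 1 := by
            rw [hBlen]; omega
          have hcr : pvChunkRow toks
              = PySem.Chars.join pvSP ((toks.take 200).map String.toList) :: pvChunkRow (toks.drop 200) := by
            unfold pvChunkRow
            rw [hcnt, List.range_succ_eq_map]
            simp only [List.map_cons, List.map_map, Nat.mul_zero, List.drop_zero]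
            congr 1
            refine List.map_congr_left fun k _ => ?_
            show PySem.Chars.join pvSP (List.map String.toList (List.take 200 (List.drop (200 * (k+1)) toks))) = _
            rw [show 200 * (k + 1) = 200 + 200 * k from by ring]
            rw [← List.drop_drop]
          rw [hcr, pv_join_cons]
          have hBne : pvChunkRow (toks.drop 200) ≠ [] := by
            unfold pvChunkRow
            have : 0 < (toks.drop 200).length := by omega
            simp only [ne_eq, List.map_eq_nil_iff, List.range_eq_nil]
            omega
          rw [pv_flatMap_ne_nil _ _ hBne, ih (toks.drop 200) (by omega)]
          conv_rhs => rw [← List.take_append_drop 200 toks]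
          rw [PySem.List.enumerate_append, List.flatMap_append]
          have htl : (toks.take 200).length = 200 := by simp; omega
          rw [pv_small0 (toks.take 200) (by simp [← List.length_pos_iff]; omega) (by omega)]
          rw [htl]
          simp only [Nat.cast_ofNat, zero_add]
          obtain ⟨b, bs, hB⟩ : ∃ b bs, toks.drop 200 = b :: bs := by
            cases hd : toks.drop 200 with
            | nil => exfalso; rw [hd] at hBlen; simp at hBlen; omega
            | cons b bs => exact ⟨b, bs, rfl⟩
          rw [hB, PySem.List.enumerate_cons, PySem.List.enumerate_cons]
          simp only [List.flatMap_cons]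
          rw [show (200:Int) + 1 = 1 + 200 from by ring,
              pv_shift bs 1 (by norm_num)]
          have hsep : pvHfn (200, b) = pvNN ++ b.toList := by
            simp [pvHfn, PySem.Int.mod]
          have hsep0 : pvHfn (0, b) = b.toList := by simp [pvHfn]
          rw [hsep, hsep0]
          simp [List.append_assoc]

lemma pv_flatten_pieces : ∀ (l : List (Int × String)),
    ((l.flatMap (fun p => (if 0 < p.1 then [if PySem.Int.mod p.1 200 = 0 then "\n\n" else " "] else []) ++ [p.2])).map String.toList).flatten
      = l.flatMap pvHfn := by
  intro l
  induction l with
  | nil => simp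
  | cons p l ih =>
      simp only [List.flatMap_cons, List.map_append, List.flatten_append, ih]
      congr 1
      by_cases h1 : 0 < p.1 <;> simp [pvHfn, pvNN, pvSP, h1] <;> split_ifs <;> rfl

lemma pv_chunk_chars (toks : List String) (k : Nat) :
    (PySem.Str.join " " (PySem.List.slice toks (some (200 * (k : Int))) (some (200 * (k : Int) + 200)))).toList
      = PySem.Chars.join pvSP ((((toks.drop (200 * k)).take 200)).map String.toList) := by
  rw [show (200 * (k : Int)) = (((200 * k : Nat)) : Int) from by push_cast; ring,
      show ((((200 * k : Nat)) : Int) + 200) = (((200 * k : Nat)) : Int) + ((200 : Nat) : Int) from by norm_num,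
      PySem.List.slice_natCast_add, PySem.Str.toList_join]
  rfl


-- ===== VERDICT (by name: the statement is the Claim_ definition above) =====
theorem prepare_for_texttiling_spec : Claim_equal_prepare_for_texttiling := by
  intro text _
  unfold Spec_prepare_for_texttiling
  unfold prepare_for_texttiling prepare_for_texttiling_alt
  simp only []
  rw [PySem.List.foldl_append_singleton_eq_map
        (fun i => PySem.Str.join " " (PySem.List.slice (PySem.Str.split₀ text) (some i) (some (i + 200)))) _ []]
  rw [show (fun (acc : List String) (p : Int × String) =>
        (if 0 < p.1 then acc ++ [if PySem.Int.mod p.1 200 = 0 then "\n\n" else " "] else acc) ++ [p.2])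
      = (fun acc p => acc ++ ((if 0 < p.1 then [if PySem.Int.mod p.1 200 = 0 then "\n\n" else " "] else []) ++ [p.2]))
      from by funext acc p; split_ifs <;> simp]
  rw [PySem.List.foldl_append_eq_flatMap]
  rw [← String.toList_inj, PySem.Str.toList_join, PySem.Str.toList_join]
  simp only [List.nil_append]
  rw [show ("".toList) = ([] : List Char) from rfl, pv_join_empty_sep, pv_flatten_pieces]
  rw [pv_range200, List.map_map, List.map_map]
  rw [show ((String.toList ∘ (fun i => PySem.Str.join " " (PySem.List.slice (PySem.Str.split₀ text) (some i) (some (i + 200))))) ∘ (fun k : Nat => 200 * (k : Int)))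
      = (fun k : Nat => PySem.Chars.join pvSP ((((PySem.Str.split₀ text).drop (200 * k)).take 200).map String.toList))
      from by funext k; exact pv_chunk_chars (PySem.Str.split₀ text) k]
  exact pv_main (PySem.Str.split₀ text).length (PySem.Str.split₀ text) le_rfl
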